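-- pv_equiv track=rewrite | github.com/kevinnbass/TestMaster | organized_codebase/testing/unit/unit/test_quality_improver.py | _fix_test_structure
-- ===== SOURCE A (Python) =====
-- from typing import List, Dict, Optional, Tuple, Any
--
-- def _fix_test_structure(content: str) -> Tuple[str, List[str]]:
--     """Fix test structure issues."""
--     improvements = []
--
--     # Ensure proper test class structure
--     if "class Test" in content and "def setup_method" not in content:
--         # Add setup_method
--         lines = content.split('\n')
--         for i, line in enumerate(lines):
--             if line.strip().startswith("class Test"):
--                 # Find first method
--                 for j in range(i + 1, len(lines)):
--                     if lines[j].strip().startswith("def "):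
--                         # Insert setup_method before first method
--                         setup = [
--                             "",
--                             "    def setup_method(self):",
--                             '        """Set up test fixtures."""',
--                             "        pass",
--                             ""
--                         ]
--                         lines[j:j] = setup
--                         improvements.append("Added setup_method")
--                         break
--                 break
--
--         content = '\n'.join(lines)
--
--     return content, improvements
-- ===== SOURCE B (Python) =====
-- def _fix_test_structure(content: str):
--     """Fix test structure issues (single forward pass with an early exit)."""
--     improvements = []
--     if "class Test" in content and "def setup_method" not in content:
--         lines = content.split('\n')
--         out = []
--         seen_class = False
--         for idx, line in enumerate(lines):
--             if seen_class and line.strip().startswith("def "):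
--                 out.extend([
--                     "",
--                     "    def setup_method(self):",
--                     '        """Set up test fixtures."""',
--                     "        pass",
--                     ""
--                 ])
--                 out.extend(lines[idx:])
--                 improvements.append("Added setup_method")
--                 break
--             if line.strip().startswith("class Test"):
--                 seen_class = True
--             out.append(line)
--         content = '\n'.join(out)
--     return content, improvements
-- ===== Notes on version B (the rewrite author's own statement) =====
-- stated objective: alternative
-- what changed: A finds the class line with one loop, then scans indices after it with a nested range loop and slice-assigns the setup block; B does a single forward pass with a seen-class flag, splicing the setup block before the first def line and stopping early.
import Mathlib
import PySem

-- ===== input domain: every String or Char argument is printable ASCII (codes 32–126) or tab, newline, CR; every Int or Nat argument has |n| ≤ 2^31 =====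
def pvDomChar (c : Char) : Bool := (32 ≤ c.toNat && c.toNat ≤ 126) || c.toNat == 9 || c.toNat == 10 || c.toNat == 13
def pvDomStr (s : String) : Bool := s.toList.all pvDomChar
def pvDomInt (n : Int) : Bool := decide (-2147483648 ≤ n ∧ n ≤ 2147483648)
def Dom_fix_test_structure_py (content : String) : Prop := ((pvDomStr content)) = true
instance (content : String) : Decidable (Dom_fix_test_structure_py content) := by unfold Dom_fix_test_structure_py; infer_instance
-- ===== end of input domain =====

-- B replaces A's nested index loops (find the class line, then scan indices for the first def and slice-assign)
-- by a single forward pass with a seen-class flag that splices the setup block and stops early; same return values.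

-- shared helpers: both Pythons test line.strip().startswith(...) and use the same 5-line setup block
def pvStartsClass (l : List Char) : Bool :=
  PySem.Chars.startswith (PySem.Chars.strip l) ("class Test".toList)
def pvStartsDef (l : List Char) : Bool :=
  PySem.Chars.startswith (PySem.Chars.strip l) ("def ".toList)
def pvSetup : List (List Char) :=
  [ "".toList,
    "    def setup_method(self):".toList,
    "        \"\"\"Set up test fixtures.\"\"\"".toList,
    "        pass".toList,
    "".toList ]

-- ===== PORT A =====
-- inner loop: for j in range(i+1, len(lines)): first def line → lines[j:j] = setup; none = loop fell through
def pvAInner : List (List Char) → Option (List (List Char))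
  | [] => none
  | l :: ls =>
    if pvStartsDef l then some (pvSetup ++ l :: ls)
    else (pvAInner ls).map (l :: ·)

-- outer loop: first line with strip().startswith("class Test"); none = no such line
def pvAOuter : List (List Char) → Option (List (List Char))
  | [] => none
  | l :: ls =>
    if pvStartsClass l then (pvAInner ls).map (l :: ·)
    else (pvAOuter ls).map (l :: ·)

def fix_test_structure_py (content : String) : String × List String :=
  if PySem.Str.isIn "class Test" content && !(PySem.Str.isIn "def setup_method" content) then
    let lines := PySem.Chars.splitOn content.toList ['\n']
    match pvAOuter lines with
    | some newLines => (String.ofList (PySem.Chars.join ['\n'] newLines), ["Added setup_method"])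
    | none => (String.ofList (PySem.Chars.join ['\n'] lines), [])
  else (content, [])

-- ===== PORT B =====
-- single pass: once a "class Test" line has been seen, splice the setup before the first "def " line and stop
def pvBScan (seen : Bool) : List (List Char) → List (List Char) × Bool
  | [] => ([], false)
  | l :: ls =>
    if seen && pvStartsDef l then (pvSetup ++ l :: ls, true)
    else
      let r := pvBScan (seen || pvStartsClass l) ls
      (l :: r.1, r.2)

def fix_test_structure_py_alt (content : String) : String × List String :=
  if PySem.Str.isIn "class Test" content && !(PySem.Str.isIn "def setup_method" content) then
    let lines := PySem.Chars.splitOn content.toList ['\n']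
    let r := pvBScan false lines
    (String.ofList (PySem.Chars.join ['\n'] r.1),
     if r.2 then ["Added setup_method"] else [])
  else (content, [])

-- ===== PRECONDITION & SPEC =====
def Spec_fix_test_structure_py (content : String) (out : String × List String) : Prop := out = fix_test_structure_py_alt content
instance (content : String) (out : String × List String) : Decidable (Spec_fix_test_structure_py content out) := by unfold Spec_fix_test_structure_py; infer_instance

-- ===== CLAIM (what is proved, stated in full; the proofs are below) =====
def Claim_equal_fix_test_structure_py : Prop := ∀ (content : String), Dom_fix_test_structure_py content → Spec_fix_test_structure_py content (fix_test_structure_py content)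

-- ===== LEMMAS AND PROOFS =====

-- with the flag already set, B's scan is exactly A's inner def-search-and-splice
theorem pvBScan_true (ls : List (List Char)) :
    pvBScan true ls = match pvAInner ls with
      | some r => (r, true)
      | none => (ls, false) := by
  induction ls with
  | nil => simp [pvBScan, pvAInner]
  | cons l ls ih =>
    cases h : pvStartsDef l
    · cases hA : pvAInner ls <;> simp [pvBScan, pvAInner, h, ih, hA]
    · simp [pvBScan, pvAInner, h]

-- before the flag is set, B's scan is exactly A's outer class-search
theorem pvBScan_false (ls : List (List Char)) :
    pvBScan false ls = match pvAOuter ls with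
      | some r => (r, true)
      | none => (ls, false) := by
  induction ls with
  | nil => simp [pvBScan, pvAOuter]
  | cons l ls ih =>
    cases h : pvStartsClass l
    · cases hA : pvAOuter ls <;> simp [pvBScan, pvAOuter, h, ih, hA]
    · cases hA : pvAInner ls <;> simp [pvBScan, pvAOuter, h, pvBScan_true, hA]

-- ===== VERDICT (by name: the statement is the Claim_ definition above) =====
theorem fix_test_structure_py_spec : Claim_equal_fix_test_structure_py := by
  intro content _
  unfold Spec_fix_test_structure_py fix_test_structure_py fix_test_structure_py_alt
  by_cases hg : (PySem.Str.isIn "class Test" content && !(PySem.Str.isIn "def setup_method" content)) = true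
  · rw [if_pos hg, if_pos hg]
    cases hA : pvAOuter (PySem.Chars.splitOn content.toList ['\n']) <;>
      simp [pvBScan_false, hA]
  · rw [if_neg hg, if_neg hg]
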